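-- pv_equiv track=rewrite | github.com/eolandro/IAENERO2026 | Tema2/Ladrillo/BOOM_BAY/boom_bay.py | seleccionar_celda
-- ===== SOURCE A (Python) =====
-- def seleccionar_celda(creencias, visitadas):
--     mejor = (-1, -1)
--     max_valor = -1
--
--     for i in range(len(creencias)):
--         for j in range(len(creencias[0])):
--             if (i, j) not in visitadas:
--                 if creencias[i][j] > max_valor:
--                     max_valor = creencias[i][j]
--                     mejor = (i, j)
--
--     return mejor
-- ===== SOURCE B (Python) =====
-- def seleccionar_celda(creencias, visitadas):
--     vis = set(visitadas)
--     pendientes = [(fila[j], i, j)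
--                   for i, fila in enumerate(creencias)
--                   for j in range(len(creencias[0]))
--                   if (i, j) not in vis]
--     orden = sorted(pendientes, key=lambda t: -t[0])
--     if orden and orden[0][0] > -1:
--         return (orden[0][1], orden[0][2])
--     return (-1, -1)
-- ===== Notes on version B (the rewrite author's own statement) =====
-- stated objective: alternative
-- what changed: A keeps a running maximum inside a nested index loop with a list membership test; B hashes visitadas into a set, collects all unvisited cells, stably sorts them by negated belief so the global order (and row-major tie-breaking) comes from the sort, and returns the head if its value exceeds -1.
import Mathlib
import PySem

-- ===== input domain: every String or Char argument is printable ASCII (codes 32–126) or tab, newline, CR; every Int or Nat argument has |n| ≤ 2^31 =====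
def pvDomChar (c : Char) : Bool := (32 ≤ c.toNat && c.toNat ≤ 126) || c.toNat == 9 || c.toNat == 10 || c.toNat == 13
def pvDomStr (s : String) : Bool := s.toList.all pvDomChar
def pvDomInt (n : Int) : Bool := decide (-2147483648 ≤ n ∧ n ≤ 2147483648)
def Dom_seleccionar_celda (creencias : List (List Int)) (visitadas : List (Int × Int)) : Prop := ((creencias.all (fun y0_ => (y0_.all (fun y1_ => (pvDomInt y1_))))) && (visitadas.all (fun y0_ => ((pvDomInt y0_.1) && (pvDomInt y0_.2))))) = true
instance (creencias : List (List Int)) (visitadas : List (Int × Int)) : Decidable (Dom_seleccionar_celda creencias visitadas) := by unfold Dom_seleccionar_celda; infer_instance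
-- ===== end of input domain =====

-- B replaces A's running-maximum nested loop by: hash visitadas into a set, list the unvisited
-- cells, stably sort them by negated belief (stability gives the row-major tie-break), take the head.

-- ===== PORT A =====
-- creencias[i][j] is read with List.getD (indices from range are non-negative); Pre_ guarantees
-- the index is in range wherever the Python actually performs the read.
def seleccionar_celda (creencias : List (List Int)) (visitadas : List (Int × Int)) : Int × Int :=
  ((List.range creencias.length).foldl (fun st i =>
      (List.range (creencias.headD []).length).foldl (fun st j =>
          if (Int.ofNat i, Int.ofNat j) ∈ visitadas then st
          else if (creencias.getD i []).getD j (-1) > st.2 then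
            ((Int.ofNat i, Int.ofNat j), (creencias.getD i []).getD j (-1))
          else st)
        st)
    (((-1 : Int), (-1 : Int)), (-1 : Int))).1

-- ===== PORT B =====
-- fila[j] is read with getD (-1); Pre_ excludes the unvisited out-of-range reads where Python raises.
def seleccionar_celda_alt (creencias : List (List Int)) (visitadas : List (Int × Int)) : Int × Int :=
  let vis := PySem.Set.ofList visitadas
  let pendientes := (PySem.List.enumerate creencias 0).flatMap (fun p =>
      (List.range (creencias.headD []).length).filterMap (fun j =>
        if (p.1, Int.ofNat j) ∉ vis then some (p.2.getD j (-1), p.1, Int.ofNat j) else none))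
  let orden := PySem.List.sorted pendientes (fun t => -t.1) false
  match orden with
  | [] => (-1, -1)
  | t :: _ => if t.1 > -1 then (t.2.1, t.2.2) else (-1, -1)

-- ===== PRECONDITION & SPEC =====
-- Pre_ excludes exactly the inputs where Python A raises IndexError: an unvisited cell (i, j)
-- with j below the width of row 0 but beyond the length of row i.
def Pre_seleccionar_celda (creencias : List (List Int)) (visitadas : List (Int × Int)) : Prop :=
  ∀ i < creencias.length, ∀ j < (creencias.headD []).length,
    (Int.ofNat i, Int.ofNat j) ∉ visitadas → j < (creencias.getD i []).length
instance (creencias : List (List Int)) (visitadas : List (Int × Int)) : Decidable (Pre_seleccionar_celda creencias visitadas) := by unfold Pre_seleccionar_celda; infer_instance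

def pvWitness_seleccionar_celda : List (List Int) × (List (Int × Int)) :=
  ([[0, 1], [2, 3]], [(0, 1)])

def Spec_seleccionar_celda (creencias : List (List Int)) (visitadas : List (Int × Int)) (out : Int × Int) : Prop := out = seleccionar_celda_alt creencias visitadas
instance (creencias : List (List Int)) (visitadas : List (Int × Int)) (out : Int × Int) : Decidable (Spec_seleccionar_celda creencias visitadas out) := by unfold Spec_seleccionar_celda; infer_instance

-- ===== CLAIM (what is proved, stated in full; the proofs are below) =====
def Claim_equal_seleccionar_celda : Prop := ∀ (creencias : List (List Int)) (visitadas : List (Int × Int)), Dom_seleccionar_celda creencias visitadas → Pre_seleccionar_celda creencias visitadas → Spec_seleccionar_celda creencias visitadas (seleccionar_celda creencias visitadas)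

-- ===== LEMMAS AND PROOFS =====

-- the body of A's nested loop, on (i, j) pairs
def pvCellStep (creencias : List (List Int)) (visitadas : List (Int × Int))
    (st : (Int × Int) × Int) (p : Nat × Nat) : (Int × Int) × Int :=
  if (Int.ofNat p.1, Int.ofNat p.2) ∈ visitadas then st
  else if (creencias.getD p.1 []).getD p.2 (-1) > st.2 then
    ((Int.ofNat p.1, Int.ofNat p.2), (creencias.getD p.1 []).getD p.2 (-1))
  else st

-- the unvisited-cell triple at a pair, if any
def pvG (creencias : List (List Int)) (visitadas : List (Int × Int)) (p : Nat × Nat) :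
    Option (Int × Int × Int) :=
  if (Int.ofNat p.1, Int.ofNat p.2) ∉ visitadas then
    some ((creencias.getD p.1 []).getD p.2 (-1), Int.ofNat p.1, Int.ofNat p.2)
  else none

-- A's running-max step on candidate triples
def pvStep (st : (Int × Int) × Int) (c : Int × Int × Int) : (Int × Int) × Int :=
  if c.1 > st.2 then ((c.2.1, c.2.2), c.1) else st

-- the head of the stable descending-by-value sort, maintained as a fold
def pvStepO (o : Option (Int × Int × Int)) (c : Int × Int × Int) : Option (Int × Int × Int) :=
  some (match o with
        | none => c
        | some m => if -c.1 < -m.1 then c else m)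

-- A's loop state, reconstructed from the current sort head
def pvRel (o : Option (Int × Int × Int)) : (Int × Int) × Int :=
  match o with
  | none => ((-1, -1), -1)
  | some m => if m.1 > -1 then ((m.2.1, m.2.2), m.1) else ((-1, -1), -1)

def pvPairs (creencias : List (List Int)) : List (Nat × Nat) :=
  (List.range creencias.length).flatMap
    (fun i => (List.range (creencias.headD []).length).map (Prod.mk i))

lemma a_eq (creencias : List (List Int)) (visitadas : List (Int × Int)) :
    seleccionar_celda creencias visitadas =
      ((pvPairs creencias).foldl (pvCellStep creencias visitadas)
        (((-1 : Int), (-1 : Int)), (-1 : Int))).1 := by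
  unfold seleccionar_celda pvPairs
  simp only [List.foldl_flatMap, List.foldl_map]
  rfl

lemma foldl_cell (creencias : List (List Int)) (visitadas : List (Int × Int)) :
    ∀ (l : List (Nat × Nat)) (st : (Int × Int) × Int),
      l.foldl (pvCellStep creencias visitadas) st =
        (l.filterMap (pvG creencias visitadas)).foldl pvStep st := by
  intro l
  induction l with
  | nil => intro st; rfl
  | cons p l ih =>
    intro st
    simp only [List.foldl_cons, List.filterMap_cons]
    by_cases hv : (Int.ofNat p.1, Int.ofNat p.2) ∈ visitadas
    · have h1 : pvCellStep creencias visitadas st p = st := by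
        unfold pvCellStep; rw [if_pos hv]
      have h2 : pvG creencias visitadas p = none := by
        unfold pvG; exact if_neg (fun h => h hv)
      rw [h1, h2]; exact ih st
    · have h2 : pvG creencias visitadas p =
          some ((creencias.getD p.1 []).getD p.2 (-1), Int.ofNat p.1, Int.ofNat p.2) := by
        unfold pvG; exact if_pos hv
      have h1 : pvCellStep creencias visitadas st p =
          pvStep st ((creencias.getD p.1 []).getD p.2 (-1), Int.ofNat p.1, Int.ofNat p.2) := by
        unfold pvCellStep pvStep; rw [if_neg hv]
      rw [h1, h2]; exact ih _

lemma enum_flatMap (H : Int × List Int → List (Int × Int × Int)) :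
    ∀ (xs : List (List Int)) (s : Nat) (K : Nat → List (Int × Int × Int)),
      (∀ k (h : k < xs.length), K (s + k) = H (Int.ofNat (s + k), xs[k])) →
      (PySem.List.enumerate xs (Int.ofNat s)).flatMap H = (List.range' s xs.length).flatMap K := by
  intro xs
  induction xs with
  | nil => intro s K _; rfl
  | cons fila xs ih =>
    intro s K hK
    rw [PySem.List.enumerate_cons]
    simp only [List.length_cons, List.range'_succ, List.flatMap_cons]
    have h0 : K s = H (Int.ofNat s, fila) := by
      have := hK 0 (by simp)
      simpa using this
    have hrec := ih (s + 1) K (by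
      intro k hk
      have := hK (k + 1) (by simp; omega)
      rw [show s + (k + 1) = s + 1 + k by omega] at this
      simpa using this)
    rw [h0, show (Int.ofNat s) + 1 = Int.ofNat (s + 1) from rfl, hrec]

lemma enum_flatMap0 (H : Int × List Int → List (Int × Int × Int))
    (xs : List (List Int)) (K : Nat → List (Int × Int × Int))
    (hK : ∀ k (h : k < xs.length), K k = H (Int.ofNat k, xs[k])) :
    (PySem.List.enumerate xs 0).flatMap H = (List.range xs.length).flatMap K := by
  rw [List.range_eq_range']
  exact enum_flatMap H xs 0 K (by intro k hk; simpa using hK k hk)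

-- B's candidate list is exactly the pvG-filtering of A's pair list
lemma pend_eq (creencias : List (List Int)) (visitadas : List (Int × Int)) :
    ((PySem.List.enumerate creencias 0).flatMap (fun p =>
        (List.range (creencias.headD []).length).filterMap (fun j =>
          if (p.1, Int.ofNat j) ∉ PySem.Set.ofList visitadas then
            some (p.2.getD j (-1), p.1, Int.ofNat j) else none))) =
      (pvPairs creencias).filterMap (pvG creencias visitadas) := by
  unfold pvPairs
  rw [List.filterMap_flatMap]
  simp only [List.filterMap_map]
  apply enum_flatMap0
  intro k hk
  apply List.filterMap_congr
  intro j _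
  simp only [Function.comp_apply]
  unfold pvG
  rw [List.getD_eq_getElem creencias [] hk]
  simp [PySem.Set.mem_ofList]

lemma rel_step (o : Option (Int × Int × Int)) (c : Int × Int × Int) :
    pvStep (pvRel o) c = pvRel (pvStepO o c) := by
  cases o with
  | none => rfl
  | some m =>
    simp only [pvRel, pvStep, pvStepO]
    split_ifs <;> first | rfl | omega

lemma rel_fold : ∀ (l : List (Int × Int × Int)) (o : Option (Int × Int × Int)),
    l.foldl pvStep (pvRel o) = pvRel (l.foldl pvStepO o) := by
  intro l
  induction l with
  | nil => intro o; rfl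
  | cons c l ih =>
    intro o
    simp only [List.foldl_cons, rel_step o c, ih (pvStepO o c)]

-- the head of the stable sort by negated value, as a left fold over the input
lemma sorted_head : ∀ (xs : List (Int × Int × Int)),
    (PySem.List.sorted xs (fun t => -t.1) false).head? = xs.foldl pvStepO none := by
  intro xs
  induction xs using List.reverseRecOn with
  | nil => rfl
  | append_singleton xs x ih =>
    have hs : PySem.List.sorted (xs ++ [x]) (fun t : Int × Int × Int => -t.1) false =
        PySem.List.insertBy (fun a b : Int × Int × Int => decide (-a.1 < -b.1)) x
          (PySem.List.sorted xs (fun t => -t.1) false) := by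
      simp [PySem.List.sorted, List.foldl_append]
    rw [hs, List.foldl_append, List.foldl_cons, List.foldl_nil]
    cases h : PySem.List.sorted xs (fun t : Int × Int × Int => -t.1) false with
    | nil =>
      rw [h] at ih
      simp only [List.head?_nil] at ih
      rw [← ih]
      rfl
    | cons y ys =>
      rw [h] at ih
      simp only [List.head?_cons] at ih
      rw [← ih]
      simp only [PySem.List.insertBy, pvStepO]
      by_cases hb : (-x.1 : Int) < -y.1
      · simp [hb]
      · simp [hb]

-- B, rewritten through pvRel of the sort head
lemma b_eq (creencias : List (List Int)) (visitadas : List (Int × Int)) :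
    seleccionar_celda_alt creencias visitadas =
      (pvRel (((pvPairs creencias).filterMap (pvG creencias visitadas)).foldl pvStepO none)).1 := by
  show (match PySem.List.sorted ((PySem.List.enumerate creencias 0).flatMap (fun p =>
      (List.range (creencias.headD []).length).filterMap (fun j =>
        if (p.1, Int.ofNat j) ∉ PySem.Set.ofList visitadas then
          some (p.2.getD j (-1), p.1, Int.ofNat j) else none))) (fun t => -t.1) false with
    | [] => ((-1 : Int), (-1 : Int))
    | t :: _ => if t.1 > -1 then (t.2.1, t.2.2) else (-1, -1)) = _
  rw [pend_eq creencias visitadas, ← sorted_head]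
  cases PySem.List.sorted ((pvPairs creencias).filterMap (pvG creencias visitadas))
      (fun t => -t.1) false with
  | nil => rfl
  | cons t l => by_cases h : t.1 > -1 <;> simp [pvRel, h]

-- ===== VERDICT (by name: the statement is the Claim_ definition above) =====
theorem seleccionar_celda_spec : Claim_equal_seleccionar_celda := by
  intro creencias visitadas _ _
  unfold Spec_seleccionar_celda
  rw [a_eq, foldl_cell, b_eq]
  exact congrArg Prod.fst (rel_fold _ none)
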